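-- pv_equiv track=rewrite | github.com/cpccu/cpccu-contest-3 | E/48945392_WA_Rafi151_E.py | max_potions_to_drink
-- ===== SOURCE A (Python) =====
-- def max_potions_to_drink(n, potions):
--     health = 0
--     potions_drunk = 0
--     for potion in potions:
--         health += potion
--         if health >= 0:
--             potions_drunk += 1
--         else:
--             break
--     return potions_drunk
-- ===== SOURCE B (Python) =====
-- def max_potions_to_drink(n, potions):
--     # Pass 1: prefix-health values.
--     sums = []
--     total = 0
--     for p in potions:
--         total += p
--         sums.append(total)
--     # Pass 2: length of the leading non-negative run.
--     k = 0
--     while k < len(sums) and sums[k] >= 0: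
--         k += 1
--     return k
-- ===== Notes on version B (the rewrite author's own statement) =====
-- stated objective: alternative
-- what changed: Replaces the single imperative loop with inline break by a two-phase decomposition: first build the list of prefix sums, then count the length of its leading non-negative run.
import Mathlib
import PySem

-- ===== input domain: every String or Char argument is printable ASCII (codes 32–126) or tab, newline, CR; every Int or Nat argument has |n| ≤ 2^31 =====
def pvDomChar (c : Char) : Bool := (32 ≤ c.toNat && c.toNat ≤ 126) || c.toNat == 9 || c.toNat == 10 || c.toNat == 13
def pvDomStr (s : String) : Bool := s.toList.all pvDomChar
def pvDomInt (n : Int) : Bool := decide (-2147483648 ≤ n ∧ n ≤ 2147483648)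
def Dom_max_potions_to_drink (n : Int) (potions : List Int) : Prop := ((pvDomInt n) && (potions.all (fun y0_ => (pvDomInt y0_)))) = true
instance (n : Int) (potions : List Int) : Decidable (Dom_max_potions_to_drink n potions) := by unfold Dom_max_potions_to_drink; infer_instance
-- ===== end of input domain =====

-- B replaces A's one loop with a break by two passes (build prefix sums, then count the leading non-negative run); same O(n) cost.

-- ===== PORT A =====
-- the for-loop with break: recursion carrying (health, potions_drunk)
def pvALoop (health potions_drunk : Int) : List Int → Int
  | [] => potions_drunk
  | potion :: rest =>
    let h := health + potion
    if h ≥ 0 then pvALoop h (potions_drunk + 1) rest else potions_drunk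

def max_potions_to_drink (n : Int) (potions : List Int) : Int :=
  pvALoop 0 0 potions

-- ===== PORT B =====
-- pass 1 of Source B: build the list of prefix sums (total is the running total)
def pvPrefixSums (total : Int) : List Int → List Int
  | [] => []
  | p :: rest => (total + p) :: pvPrefixSums (total + p) rest

-- pass 2 of Source B: the while-loop counts the leading non-negative run (= takeWhile length)
def max_potions_to_drink_alt (n : Int) (potions : List Int) : Int :=
  ((pvPrefixSums 0 potions).takeWhile (fun s => s ≥ 0)).length

-- ===== PRECONDITION & SPEC =====
def Spec_max_potions_to_drink (n : Int) (potions : List Int) (out : Int) : Prop := out = max_potions_to_drink_alt n potions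
instance (n : Int) (potions : List Int) (out : Int) : Decidable (Spec_max_potions_to_drink n potions out) := by unfold Spec_max_potions_to_drink; infer_instance

-- ===== CLAIM (what is proved, stated in full; the proofs are below) =====
def Claim_equal_max_potions_to_drink : Prop := ∀ (n : Int) (potions : List Int), Dom_max_potions_to_drink n potions → Spec_max_potions_to_drink n potions (max_potions_to_drink n potions)

-- ===== LEMMAS AND PROOFS =====
theorem pvALoop_eq (l : List Int) : ∀ (h c : Int),
    pvALoop h c l = c + ((pvPrefixSums h l).takeWhile (fun s => s ≥ 0)).length := by
  induction l with
  | nil => intro h c; simp [pvALoop, pvPrefixSums]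
  | cons p rest ih =>
    intro h c
    simp only [pvALoop, pvPrefixSums, List.takeWhile]
    by_cases hp : h + p ≥ 0
    · simp only [hp, if_pos, ih]
      simp [List.length_cons]
      ring
    · simp [hp]

-- ===== VERDICT (by name: the statement is the Claim_ definition above) =====
theorem max_potions_to_drink_spec : Claim_equal_max_potions_to_drink := by
  intro n potions _
  unfold Spec_max_potions_to_drink max_potions_to_drink max_potions_to_drink_alt
  rw [pvALoop_eq]
  simp
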